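-- pv_equiv track=rewrite | github.com/mdobson/pl_tools | backends/py/parser.py | skip_space
-- ===== SOURCE A (Python) =====
-- def skip_space(s: str, idx: int):
--     while True:
--         save = idx
--         while idx < len(s) and s[idx].isspace():
--             idx += 1
--         if idx < len(s) and s[idx] == ';':
--             idx += 1
--             while idx < len(s) and s[idx] != '\n':
--                 idx += 1
--         if idx == save:
--             break
--     return idx
-- ===== SOURCE B (Python) =====
-- def skip_space(s, idx):
--     # Two staged passes instead of A's rescanning fixpoint loop:
--     # pass 1 marks every position covered by a ';' comment, pass 2 selects
--     # the first unmarked position holding a real (non-whitespace, non-';') char.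
--     n = len(s)
--     covered = set()
--     inc = False
--     for k in range(idx, n):
--         if inc:
--             covered.add(k)
--             if s[k] == '\n':
--                 inc = False
--         elif s[k] == ';':
--             inc = True
--     for k in range(idx, n):
--         if k not in covered and not s[k].isspace() and s[k] != ';':
--             return k
--     return max(idx, n)
-- ===== Notes on version B (the rewrite author's own statement) =====
-- stated objective: alternative
-- what changed: Replaces A's rescanning save/fixpoint loop by two staged passes: a first pass builds an explicit set of positions covered by ';' comments (a small state machine over range(idx, n)), and a second pass returns the first unmarked position holding a non-whitespace, non-';' character.
import Mathlib
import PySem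

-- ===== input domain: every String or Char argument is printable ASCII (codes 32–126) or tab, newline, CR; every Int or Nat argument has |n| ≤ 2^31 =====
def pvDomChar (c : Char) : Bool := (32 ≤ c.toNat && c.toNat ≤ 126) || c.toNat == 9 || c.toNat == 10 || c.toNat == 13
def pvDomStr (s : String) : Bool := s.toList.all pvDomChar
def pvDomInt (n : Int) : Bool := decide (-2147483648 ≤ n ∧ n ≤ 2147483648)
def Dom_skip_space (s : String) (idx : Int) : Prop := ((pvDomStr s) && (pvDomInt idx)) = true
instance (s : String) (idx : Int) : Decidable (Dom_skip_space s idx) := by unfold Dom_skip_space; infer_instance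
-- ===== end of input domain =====

-- B replaces A's rescanning save/fixpoint loop by two staged passes: a first pass builds the
-- set of positions covered by ';' comments, a second pass returns the first uncovered position
-- holding a non-whitespace, non-';' character. Same return value on every input A accepts
-- (Pre_ excludes only idx < -len(s), where Python A raises IndexError).
--
-- 'idx < len(s) and s[idx]…' is ported through PySem.List.pyGet?: 'none' covers both idx ≥ len
-- (guard false in Python) and idx < -len (IndexError in Python, excluded by Pre_skip_space).
-- Each while-loop of A is a structural recursion on a fuel argument; the wrapper passes
-- (len - idx).toNat + 1 fuel, which exceeds the loop's iteration count (the index grows by at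
-- least 1 per iteration and the loop ends once it reaches len), so fuel never runs out.

-- ===== PORT A =====
-- inner loop 'while idx < len(s) and s[idx].isspace(): idx += 1'
def aSkipWsGo (cs : List Char) : Nat → Int → Int
  | 0, idx => idx
  | fuel + 1, idx =>
    match PySem.List.pyGet? cs idx with
    | some c => if PySem.Chars.isspace c then aSkipWsGo cs fuel (idx + 1) else idx
    | none => idx

def aSkipWs (cs : List Char) (idx : Int) : Int :=
  aSkipWsGo cs (((cs.length : Int) - idx).toNat + 1) idx

-- inner loop 'while idx < len(s) and s[idx] != '\n': idx += 1'
def aSkipCommentGo (cs : List Char) : Nat → Int → Int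
  | 0, idx => idx
  | fuel + 1, idx =>
    match PySem.List.pyGet? cs idx with
    | some c => if c ≠ '\n' then aSkipCommentGo cs fuel (idx + 1) else idx
    | none => idx

def aSkipComment (cs : List Char) (idx : Int) : Int :=
  aSkipCommentGo cs (((cs.length : Int) - idx).toNat + 1) idx

-- one pass of A's outer 'while True' body: skip whitespace, then maybe a ';' comment
def aStep (cs : List Char) (idx : Int) : Int :=
  if PySem.List.pyGet? cs (aSkipWs cs idx) = some ';' then
    aSkipComment cs (aSkipWs cs idx + 1)
  else aSkipWs cs idx

-- A's outer 'while True: save = idx; …; if idx == save: break'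
def aLoopGo (cs : List Char) : Nat → Int → Int
  | 0, idx => idx
  | fuel + 1, idx => if aStep cs idx = idx then idx else aLoopGo cs fuel (aStep cs idx)

def aLoop (cs : List Char) (idx : Int) : Int :=
  aLoopGo cs (((cs.length : Int) - idx).toNat + 1) idx

def skip_space (s : String) (idx : Int) : Int := aLoop s.toList idx

-- ===== PORT B =====
-- stage 1, loop body: 'if inc: covered.add(k); if s[k]=='\n': inc=False; elif s[k]==';': inc=True'
def bMaskStep (cs : List Char) (st : PySem.Set Int × Bool) (k : Int) : PySem.Set Int × Bool :=
  if st.2 then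
    (PySem.Set.add st.1 k, if PySem.List.pyGet? cs k = some '\n' then false else true)
  else
    (st.1, if PySem.List.pyGet? cs k = some ';' then true else false)

-- stage 1: 'covered = set(); inc = False; for k in range(idx, n): …'
def bMask (cs : List Char) (idx : Int) : PySem.Set Int × Bool :=
  (PySem.List.pyRange idx (cs.length : Int) 1).foldl (bMaskStep cs) (PySem.Set.empty, false)

-- 'not s[k].isspace() and s[k] != ';''  (pyGet? = none only outside Pre_, where Python raises)
def bToken (cs : List Char) (k : Int) : Bool :=
  match PySem.List.pyGet? cs k with
  | some c => !(PySem.Chars.isspace c) && !(decide (c = ';'))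
  | none => false

-- stage 2: 'for k in range(idx, n): if k not in covered and …: return k' then 'return max(idx, n)'
def skip_space_alt (s : String) (idx : Int) : Int :=
  let cs := s.toList
  let cov := (bMask cs idx).1
  match (PySem.List.pyRange idx (cs.length : Int) 1).find?
      (fun k => !(PySem.Set.contains cov k) && bToken cs k) with
  | some k => k
  | none => max idx (cs.length : Int)

-- ===== PRECONDITION & SPEC =====
-- Pre_ excludes exactly the inputs where Python A raises IndexError (idx < -len(s), reached by
-- 's[idx]' since 'idx < len(s)' holds there); Python B raises there too.
def Pre_skip_space (s : String) (idx : Int) : Prop :=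
  -(s.length : Int) ≤ idx ∨ (s.length : Int) ≤ idx
instance (s : String) (idx : Int) : Decidable (Pre_skip_space s idx) := by
  unfold Pre_skip_space; infer_instance

def pvWitness_skip_space : String × Int := ("  ; hi\n x", 0)

def Spec_skip_space (s : String) (idx : Int) (out : Int) : Prop := out = skip_space_alt s idx
instance (s : String) (idx : Int) (out : Int) : Decidable (Spec_skip_space s idx out) := by
  unfold Spec_skip_space; infer_instance

-- ===== CLAIM (what is proved, stated in full; the proofs are below) =====
def Claim_equal_skip_space : Prop := ∀ (s : String) (idx : Int), Dom_skip_space s idx → Pre_skip_space s idx → Spec_skip_space s idx (skip_space s idx)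

-- ===== LEMMAS AND PROOFS =====
lemma pg_some_lt {cs : List Char} {i : Int} {c : Char}
    (h : PySem.List.pyGet? cs i = some c) : i < (cs.length : Int) := by
  by_contra hn
  have h0 : 0 ≤ i := le_trans (by positivity) (le_of_not_gt hn)
  rw [PySem.List.pyGet?_of_nonneg cs h0, List.getElem?_eq_none (by omega)] at h
  simp at h

lemma pg_none_of_ge {cs : List Char} {i : Int} (hn : (cs.length : Int) ≤ i) :
    PySem.List.pyGet? cs i = none := by
  have h0 : 0 ≤ i := le_trans (by positivity) hn
  rw [PySem.List.pyGet?_of_nonneg cs h0, List.getElem?_eq_none (by omega)]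

lemma pg_some_of_lt {cs : List Char} {i : Int} (h1 : -(cs.length : Int) ≤ i)
    (h2 : i < (cs.length : Int)) : ∃ c, PySem.List.pyGet? cs i = some c := by
  cases h : PySem.List.pyGet? cs i with
  | some c => exact ⟨c, rfl⟩
  | none =>
      rw [PySem.List.pyGet?_eq_none_iff] at h
      exact absurd h (by unfold PySem.Raise.InRange; omega)

-- ==== part 1: A's fixpoint loop equals a per-character dispatch loop (proof helper dLoop) ====

-- proof-only helper: a single dispatch loop, intermediate between A's fixpoint and B's stages
def dLoopGo (cs : List Char) : Nat → Int → Int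
  | 0, idx => idx
  | fuel + 1, idx =>
    match PySem.List.pyGet? cs idx with
    | some c =>
        if PySem.Chars.isspace c then dLoopGo cs fuel (idx + 1)
        else if c = ';' then dLoopGo cs fuel (aSkipComment cs (idx + 1))
        else idx
    | none => idx

def dLoop (cs : List Char) (idx : Int) : Int :=
  dLoopGo cs (((cs.length : Int) - idx).toNat + 1) idx

-- the loops do not depend on the fuel once it exceeds the remaining distance to the end
lemma wsGo_eq (cs : List Char) : ∀ {f g : Nat} {idx : Int},
    ((cs.length : Int) - idx).toNat < f → ((cs.length : Int) - idx).toNat < g →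
    aSkipWsGo cs f idx = aSkipWsGo cs g idx := by
  intro f
  induction f with
  | zero => intro g idx hf hg; omega
  | succ f ih =>
      intro g idx hf hg
      cases g with
      | zero => omega
      | succ g =>
          simp only [aSkipWsGo]
          cases h : PySem.List.pyGet? cs idx with
          | some c =>
              by_cases hs : PySem.Chars.isspace c
              · have := pg_some_lt h
                simp only [hs, if_true]
                exact ih (by omega) (by omega)
              · simp [hs]
          | none => rfl

lemma aSkipWsGo_le (cs : List Char) : ∀ (f : Nat) (idx : Int), idx ≤ aSkipWsGo cs f idx := by
  intro f
  induction f with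
  | zero => intro idx; simp [aSkipWsGo]
  | succ f ih =>
      intro idx
      simp only [aSkipWsGo]
      cases h : PySem.List.pyGet? cs idx with
      | some c =>
          by_cases hs : PySem.Chars.isspace c
          · have := ih (idx + 1); simp only [hs, if_true]; omega
          · simp [hs]
      | none => simp

lemma aSkipWs_le (cs : List Char) (idx : Int) : idx ≤ aSkipWs cs idx :=
  aSkipWsGo_le cs _ idx

-- one-step rewrite lemmas for the whitespace pass
lemma ws_none {cs : List Char} {idx : Int} (h : PySem.List.pyGet? cs idx = none) :
    aSkipWs cs idx = idx := by
  unfold aSkipWs; simp [aSkipWsGo, h]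

lemma ws_stop {cs : List Char} {idx : Int} {c : Char} (h : PySem.List.pyGet? cs idx = some c)
    (hs : PySem.Chars.isspace c = false) : aSkipWs cs idx = idx := by
  unfold aSkipWs; simp [aSkipWsGo, h, hs]

lemma ws_step {cs : List Char} {idx : Int} {c : Char} (h : PySem.List.pyGet? cs idx = some c)
    (hs : PySem.Chars.isspace c = true) : aSkipWs cs idx = aSkipWs cs (idx + 1) := by
  have hlt := pg_some_lt h
  unfold aSkipWs
  rw [wsGo_eq cs (f := ((cs.length : Int) - (idx + 1)).toNat + 1)
    (g := ((cs.length : Int) - idx).toNat) (idx := idx + 1) (by omega) (by omega)]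
  simp [aSkipWsGo, h, hs]

lemma aSkipWs_ne_lt (cs : List Char) (idx : Int) (h : aSkipWs cs idx ≠ idx) :
    idx < (cs.length : Int) := by
  by_contra hn
  exact h (ws_none (pg_none_of_ge (le_of_not_gt hn)))

lemma acGo_le (cs : List Char) : ∀ (f : Nat) (idx : Int), idx ≤ aSkipCommentGo cs f idx := by
  intro f
  induction f with
  | zero => intro idx; simp [aSkipCommentGo]
  | succ f ih =>
      intro idx
      simp only [aSkipCommentGo]
      cases h : PySem.List.pyGet? cs idx with
      | some c =>
          by_cases hc : c = '\n'
          · simp [hc]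
          · have := ih (idx + 1); simp only [hc, ne_eq, not_false_iff, if_true]; omega
      | none => simp

lemma aSkipComment_le (cs : List Char) (idx : Int) : idx ≤ aSkipComment cs idx :=
  acGo_le cs _ idx

-- facts about one pass of A's outer loop body
lemma aStep_le (cs : List Char) (idx : Int) : idx ≤ aStep cs idx := by
  unfold aStep
  have h1 := aSkipWs_le cs idx
  split
  · have := aSkipComment_le cs (aSkipWs cs idx + 1); omega
  · omega

lemma aStep_ne_lt (cs : List Char) (idx : Int) (h : aStep cs idx ≠ idx) :
    idx < (cs.length : Int) := by
  by_cases hw : aSkipWs cs idx = idx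
  · unfold aStep at h
    rw [hw] at h
    split at h
    · have := pg_some_lt (by assumption : PySem.List.pyGet? cs idx = some ';')
      omega
    · exact absurd rfl h
  · exact aSkipWs_ne_lt cs idx hw

-- fuel-independence and one-step rewrites for A's outer loop
lemma aLoopGo_eq (cs : List Char) : ∀ {f g : Nat} {idx : Int},
    ((cs.length : Int) - idx).toNat < f → ((cs.length : Int) - idx).toNat < g →
    aLoopGo cs f idx = aLoopGo cs g idx := by
  intro f
  induction f with
  | zero => intro g idx hf hg; omega
  | succ f ih =>
      intro g idx hf hg
      cases g with
      | zero => omega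
      | succ g =>
          simp only [aLoopGo]
          by_cases h : aStep cs idx = idx
          · simp [h]
          · have h1 := aStep_le cs idx
            have h2 := aStep_ne_lt cs idx h
            have h3 : aStep cs idx ≠ idx := h
            simp only [h3, if_false]
            exact ih (idx := aStep cs idx) (by omega) (by omega)

lemma aloop_fix {cs : List Char} {idx : Int} (h : aStep cs idx = idx) :
    aLoop cs idx = idx := by
  unfold aLoop; simp [aLoopGo, h]

lemma aloop_step {cs : List Char} {idx : Int} (h : aStep cs idx ≠ idx) :
    aLoop cs idx = aLoop cs (aStep cs idx) := by
  have h1 := aStep_le cs idx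
  have h2 := aStep_ne_lt cs idx h
  unfold aLoop
  rw [aLoopGo_eq cs (f := ((cs.length : Int) - aStep cs idx).toNat + 1)
    (g := ((cs.length : Int) - idx).toNat) (idx := aStep cs idx) (by omega) (by omega)]
  simp [aLoopGo, h]

-- fuel-independence and one-step rewrites for the dispatch loop
lemma dLoopGo_eq (cs : List Char) : ∀ {f g : Nat} {idx : Int},
    ((cs.length : Int) - idx).toNat < f → ((cs.length : Int) - idx).toNat < g →
    dLoopGo cs f idx = dLoopGo cs g idx := by
  intro f
  induction f with
  | zero => intro g idx hf hg; omega
  | succ f ih =>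
      intro g idx hf hg
      cases g with
      | zero => omega
      | succ g =>
          simp only [dLoopGo]
          cases h : PySem.List.pyGet? cs idx with
          | some c =>
              have hlt := pg_some_lt h
              by_cases hs : PySem.Chars.isspace c
              · simp only [hs, if_true]
                exact ih (idx := idx + 1) (by omega) (by omega)
              · by_cases hc : c = ';'
                · have := aSkipComment_le cs (idx + 1)
                  simp only [hc, if_true]
                  exact ih (idx := aSkipComment cs (idx + 1)) (by omega) (by omega)
                · simp [hs, hc]
          | none => rfl

lemma dloop_none {cs : List Char} {idx : Int} (h : PySem.List.pyGet? cs idx = none) :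
    dLoop cs idx = idx := by
  unfold dLoop; simp [dLoopGo, h]

lemma dloop_other {cs : List Char} {idx : Int} {c : Char} (h : PySem.List.pyGet? cs idx = some c)
    (hs : PySem.Chars.isspace c = false) (hc : c ≠ ';') : dLoop cs idx = idx := by
  unfold dLoop; simp [dLoopGo, h, hs, hc]

lemma dloop_space {cs : List Char} {idx : Int} {c : Char} (h : PySem.List.pyGet? cs idx = some c)
    (hs : PySem.Chars.isspace c = true) : dLoop cs idx = dLoop cs (idx + 1) := by
  have hlt := pg_some_lt h
  unfold dLoop
  rw [dLoopGo_eq cs (f := ((cs.length : Int) - (idx + 1)).toNat + 1)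
    (g := ((cs.length : Int) - idx).toNat) (idx := idx + 1) (by omega) (by omega)]
  simp [dLoopGo, h, hs]

lemma dloop_semi {cs : List Char} {idx : Int} (h : PySem.List.pyGet? cs idx = some ';') :
    dLoop cs idx = dLoop cs (aSkipComment cs (idx + 1)) := by
  have hlt := pg_some_lt h
  have hle := aSkipComment_le cs (idx + 1)
  unfold dLoop
  rw [dLoopGo_eq cs (f := ((cs.length : Int) - aSkipComment cs (idx + 1)).toNat + 1)
    (g := ((cs.length : Int) - idx).toNat) (idx := aSkipComment cs (idx + 1)) (by omega) (by omega)]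
  simp [dLoopGo, h, show PySem.Chars.isspace ';' = false by decide]

-- the dispatch loop absorbs a whole whitespace pass of A
lemma dLoop_skipWs (cs : List Char) : ∀ (m : Nat) (idx : Int),
    ((cs.length : Int) - idx).toNat ≤ m → dLoop cs (aSkipWs cs idx) = dLoop cs idx := by
  intro m
  induction m with
  | zero =>
      intro idx hm
      rw [ws_none (pg_none_of_ge (by omega))]
  | succ m ih =>
      intro idx hm
      cases h : PySem.List.pyGet? cs idx with
      | some c =>
          by_cases hs : PySem.Chars.isspace c
          · have hlt := pg_some_lt h
            rw [ws_step h hs, ih (idx + 1) (by omega), dloop_space h hs]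
          · rw [ws_stop h (by simpa using hs)]
      | none => rw [ws_none h]

-- a fixed point of the whitespace pass with no ';' next is a fixed point of the dispatch loop
lemma dLoop_fix (cs : List Char) (idx : Int) (hw : aSkipWs cs idx = idx)
    (hg : PySem.List.pyGet? cs idx ≠ some ';') : dLoop cs idx = idx := by
  cases h : PySem.List.pyGet? cs idx with
  | none => exact dloop_none h
  | some c =>
      have hs : PySem.Chars.isspace c = false := by
        by_contra hsp
        simp only [Bool.not_eq_false] at hsp
        rw [ws_step h hsp] at hw
        have := aSkipWs_le cs (idx + 1)
        omega
      have hc : c ≠ ';' := by intro hc; exact hg (hc ▸ h)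
      exact dloop_other h hs hc

lemma aSkipWs_idem (cs : List Char) : ∀ (m : Nat) (idx : Int),
    ((cs.length : Int) - idx).toNat ≤ m → aSkipWs cs (aSkipWs cs idx) = aSkipWs cs idx := by
  intro m
  induction m with
  | zero =>
      intro idx hm
      have h := ws_none (pg_none_of_ge (cs := cs) (i := idx) (by omega))
      rw [h, h]
  | succ m ih =>
      intro idx hm
      cases h : PySem.List.pyGet? cs idx with
      | some c =>
          by_cases hs : PySem.Chars.isspace c
          · have hlt := pg_some_lt h
            rw [ws_step h hs]
            exact ih (idx + 1) (by omega)
          · have h' := ws_stop h (by simpa using hs)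
            rw [h', h']
      | none =>
          have h' := ws_none h
          rw [h', h']

lemma aLoop_eq_dLoop (cs : List Char) :
    ∀ (m : Nat) (idx : Int), ((cs.length : Int) - idx).toNat ≤ m →
      aLoop cs idx = dLoop cs idx := by
  intro m
  induction m with
  | zero =>
      intro idx hm
      have hge : (cs.length : Int) ≤ idx := by omega
      have hg := pg_none_of_ge hge
      have hw : aSkipWs cs idx = idx := ws_none hg
      have hstep : aStep cs idx = idx := by unfold aStep; rw [hw, hg]; simp
      rw [aloop_fix hstep, dloop_none hg]
  | succ m ih =>
      intro idx hm
      by_cases hg : PySem.List.pyGet? cs (aSkipWs cs idx) = some ';'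
      · -- a comment follows the whitespace pass: both loops advance to the same index
        have hstep : aStep cs idx = aSkipComment cs (aSkipWs cs idx + 1) := by
          unfold aStep; rw [if_pos hg]
        have hws := aSkipWs_le cs idx
        have hcm := aSkipComment_le cs (aSkipWs cs idx + 1)
        have hlt : aSkipWs cs idx < (cs.length : Int) := pg_some_lt hg
        have hne : aStep cs idx ≠ idx := by omega
        rw [aloop_step hne, hstep]
        rw [← dLoop_skipWs cs (m + 1) idx hm, dloop_semi hg]
        exact ih _ (by omega)
      · by_cases hw : aSkipWs cs idx = idx
        · -- nothing to do at idx: both loops return idx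
          have hstep : aStep cs idx = idx := by
            unfold aStep; rw [hw, if_neg (hw ▸ hg)]
          rw [aloop_fix hstep, dLoop_fix cs idx hw (hw ▸ hg)]
        · -- only whitespace was consumed: A recurses once more and stops; dLoop absorbed the pass
          have hws := aSkipWs_le cs idx
          have hlt := aSkipWs_ne_lt cs idx hw
          have hstep : aStep cs idx = aSkipWs cs idx := by
            unfold aStep; rw [if_neg hg]
          have h2 : aStep cs (aSkipWs cs idx) = aSkipWs cs idx := by
            unfold aStep; rw [aSkipWs_idem cs (m + 1) idx hm, if_neg hg]
          rw [aloop_step (hstep ▸ hw), hstep, aloop_fix h2]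
          rw [← dLoop_skipWs cs (m + 1) idx hm,
            dLoop_fix cs (aSkipWs cs idx) (aSkipWs_idem cs (m + 1) idx hm) hg]

-- ==== part 2: the dispatch loop equals B's two staged passes ====

-- the comment state of B's stage-1 machine just before processing position idx + m
def incE (cs : List Char) (idx : Int) : Nat → Bool
  | 0 => false
  | m + 1 =>
      if incE cs idx m then !(decide (PySem.List.pyGet? cs (idx + m) = some '\n'))
      else decide (PySem.List.pyGet? cs (idx + m) = some ';')

-- the fold of stage 1 computes incE and marks exactly the positions where incE is true
lemma bMask_fold (cs : List Char) (idx : Int) : ∀ (m : Nat),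
    ((PySem.List.pyRange idx (idx + (m : Int)) 1).foldl (bMaskStep cs) (PySem.Set.empty, false)).2
      = incE cs idx m ∧
    ∀ j : Int, (j ∈ ((PySem.List.pyRange idx (idx + (m : Int)) 1).foldl (bMaskStep cs)
        (PySem.Set.empty, false)).1
      ↔ idx ≤ j ∧ j < idx + (m : Int) ∧ incE cs idx (j - idx).toNat = true) := by
  intro m
  induction m with
  | zero =>
      constructor
      · simp [incE]
      · intro j
        simp [PySem.Set.empty]
        omega
  | succ m ih =>
      obtain ⟨ih2, ih1⟩ := ih
      have hsplit : PySem.List.pyRange idx (idx + ((m + 1 : Nat) : Int)) 1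
          = PySem.List.pyRange idx (idx + (m : Int)) 1 ++ [idx + (m : Int)] := by
        have : idx + ((m + 1 : Nat) : Int) = (idx + (m : Int)) + 1 := by push_cast; ring
        rw [this, PySem.List.pyRange_one_succ_right (by omega)]
      rw [hsplit, List.foldl_append]
      set st := (PySem.List.pyRange idx (idx + (m : Int)) 1).foldl (bMaskStep cs)
        (PySem.Set.empty, false) with hst
      simp only [List.foldl_cons, List.foldl_nil]
      unfold bMaskStep
      by_cases hinc : st.2
      · rw [if_pos hinc]
        rw [ih2] at hinc
        constructor
        · simp only [incE, hinc, if_true]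
          split <;> simp_all
        · intro j
          simp only [PySem.Set.mem_add, ih1]
          constructor
          · rintro (⟨h1, h2, h3⟩ | rfl)
            · exact ⟨h1, by push_cast; omega, h3⟩
            · refine ⟨by omega, by push_cast; omega, ?_⟩
              have : (idx + (m : Int) - idx).toNat = m := by omega
              rw [this, hinc]
          · rintro ⟨h1, h2, h3⟩
            by_cases hj : j = idx + (m : Int)
            · exact Or.inr hj
            · exact Or.inl ⟨h1, by push_cast at h2 ⊢; omega, h3⟩
      · rw [if_neg hinc]
        rw [ih2] at hinc
        simp only [Bool.not_eq_true] at hinc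
        constructor
        · simp only [incE, hinc, Bool.false_eq_true, if_false]
          split <;> simp_all
        · intro j
          simp only [ih1]
          constructor
          · rintro ⟨h1, h2, h3⟩
            exact ⟨h1, by push_cast; omega, h3⟩
          · rintro ⟨h1, h2, h3⟩
            refine ⟨h1, ?_, h3⟩
            by_cases hj : j = idx + (m : Int)
            · subst hj
              have : (idx + (m : Int) - idx).toNat = m := by omega
              rw [this] at h3
              rw [h3] at hinc
              exact absurd hinc (by simp)
            · push_cast at h2 ⊢; omega

-- membership in B's covered set, in closed form
lemma bMask_mem (cs : List Char) (idx : Int) (j : Int) :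
    j ∈ (bMask cs idx).1
      ↔ idx ≤ j ∧ j < (cs.length : Int) ∧ incE cs idx (j - idx).toNat = true := by
  unfold bMask
  by_cases hle : idx ≤ (cs.length : Int)
  · have hm : (cs.length : Int) = idx + (((cs.length : Int) - idx).toNat : Int) := by omega
    rw [hm]
    exact (bMask_fold cs idx (((cs.length : Int) - idx).toNat)).2 j
  · rw [PySem.List.pyRange_one_eq_nil (by omega)]
    simp [PySem.Set.empty]
    omega

-- incE stays true across a run of non-newline characters
lemma incE_run (cs : List Char) (idx : Int) : ∀ (d : Nat) (a : Int), idx ≤ a →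
    incE cs idx (a - idx).toNat = true →
    (∀ i : Int, a ≤ i → i < a + (d : Int) →
      ∃ c, PySem.List.pyGet? cs i = some c ∧ c ≠ '\n') →
    incE cs idx (a + (d : Int) - idx).toNat = true := by
  intro d
  induction d with
  | zero => intro a h1 h2 _; simpa using h2
  | succ d ih =>
      intro a h1 h2 hrun
      obtain ⟨c, hc, hcn⟩ := hrun a le_rfl (by push_cast; omega)
      have hnext : incE cs idx (a + 1 - idx).toNat = true := by
        have harith : (a + 1 - idx).toNat = (a - idx).toNat + 1 := by omega
        rw [harith]
        simp only [incE]
        have : idx + ((a - idx).toNat : Int) = a := by omega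
        rw [this, h2, if_pos rfl, hc]
        simp [hcn]
      have := ih (a + 1) (by omega) hnext
        (fun i hi1 hi2 => hrun i (by omega) (by push_cast at hi2 ⊢; omega))
      have harith : a + 1 + (d : Int) - idx = a + ((d + 1 : Nat) : Int) - idx := by
        push_cast; ring
      rw [harith] at this
      exact this

-- characterisation of A's comment loop: it stops at the first '\n' (or at the end)
lemma cGo_spec (cs : List Char) : ∀ (f : Nat) (j : Int),
    ((cs.length : Int) - j).toNat < f →
    j ≤ aSkipCommentGo cs f j ∧
    (∀ i : Int, j ≤ i → i < aSkipCommentGo cs f j →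
      ∃ c, PySem.List.pyGet? cs i = some c ∧ c ≠ '\n') ∧
    (PySem.List.pyGet? cs (aSkipCommentGo cs f j) = some '\n' ∨
      PySem.List.pyGet? cs (aSkipCommentGo cs f j) = none) := by
  intro f
  induction f with
  | zero => intro j hf; omega
  | succ f ih =>
      intro j hf
      simp only [aSkipCommentGo]
      cases h : PySem.List.pyGet? cs j with
      | some c =>
          by_cases hc : c = '\n'
          · subst hc
            simp only [ne_eq, not_true_eq_false, if_false]
            exact ⟨le_rfl, fun i h1 h2 => by omega, Or.inl h⟩
          · have hlt := pg_some_lt h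
            simp only [ne_eq, hc, not_false_iff, if_true]
            obtain ⟨ih1, ih2, ih3⟩ := ih (j + 1) (by omega)
            refine ⟨by omega, ?_, ih3⟩
            intro i hi1 hi2
            by_cases hij : i = j
            · subst hij
              exact ⟨c, h, hc⟩
            · exact ih2 i (by omega) hi2
      | none =>
          simp only [h]
          exact ⟨le_rfl, fun i h1 h2 => by omega, Or.inr trivial⟩

lemma aSkipComment_spec (cs : List Char) (j : Int) :
    j ≤ aSkipComment cs j ∧
    (∀ i : Int, j ≤ i → i < aSkipComment cs j →
      ∃ c, PySem.List.pyGet? cs i = some c ∧ c ≠ '\n') ∧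
    (PySem.List.pyGet? cs (aSkipComment cs j) = some '\n' ∨
      PySem.List.pyGet? cs (aSkipComment cs j) = none) :=
  cGo_spec cs _ j (by omega)

-- stage 2's predicate, abbreviated
def qPred (cs : List Char) (idx : Int) (k : Int) : Bool :=
  !(PySem.Set.contains (bMask cs idx).1 k) && bToken cs k

-- find? returns none on a range all of whose members fail the predicate
lemma find_none_of_fail (cs : List Char) (idx : Int) : ∀ (m : Nat) (a b : Int),
    b - a ≤ (m : Int) →
    (∀ j : Int, a ≤ j → j < b → qPred cs idx j = false) →
    (PySem.List.pyRange a b 1).find? (qPred cs idx) = none := by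
  intro m
  induction m with
  | zero =>
      intro a b hm _
      rw [PySem.List.pyRange_one_eq_nil (by omega)]
      rfl
  | succ m ih =>
      intro a b hm hfail
      by_cases hab : b ≤ a
      · rw [PySem.List.pyRange_one_eq_nil hab]; rfl
      · rw [PySem.List.pyRange_one_cons (by omega)]
        rw [List.find?_cons_of_neg (by simp [hfail a le_rfl (by omega)])]
        exact ih (a + 1) b (by omega) (fun j h1 h2 => hfail j (by omega) h2)

-- skipping a failing prefix of the range does not change find?
lemma find_skip (cs : List Char) (idx : Int) (a b n' : Int) (h1 : a ≤ b) (h2 : b ≤ n')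
    (hfail : ∀ j : Int, a ≤ j → j < b → qPred cs idx j = false) :
    (PySem.List.pyRange a n' 1).find? (qPred cs idx)
      = (PySem.List.pyRange b n' 1).find? (qPred cs idx) := by
  rw [PySem.List.pyRange_one_append a b n' h1 h2, List.find?_append,
    find_none_of_fail cs idx (b - a).toNat a b (by omega) hfail]
  rfl

-- the dispatch loop from any position where stage 1's machine is out of a comment
-- returns exactly what stage 2 finds from that position
lemma dLoop_eq_find (cs : List Char) (idx : Int) (hpre : -(cs.length : Int) ≤ idx) :
    ∀ (m : Nat) (k : Int), idx ≤ k → k ≤ max idx (cs.length : Int) →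
    ((cs.length : Int) - k).toNat ≤ m →
    incE cs idx (k - idx).toNat = false →
    (match (PySem.List.pyRange k (cs.length : Int) 1).find? (qPred cs idx) with
      | some j => j
      | none => max idx (cs.length : Int)) = dLoop cs k := by
  intro m
  induction m with
  | zero =>
      intro k hk1 hk2 hm _
      have hge : (cs.length : Int) ≤ k := by omega
      rw [PySem.List.pyRange_one_eq_nil hge]
      rw [dloop_none (pg_none_of_ge hge)]
      show max idx (cs.length : Int) = k
      omega
  | succ m ih =>
      intro k hk1 hk2 hm hinc
      cases h : PySem.List.pyGet? cs k with
      | none =>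
          have hge : (cs.length : Int) ≤ k := by
            by_contra hn
            obtain ⟨c, hc⟩ := pg_some_of_lt (cs := cs) (i := k) (by omega) (by omega)
            rw [h] at hc
            cases hc
          rw [PySem.List.pyRange_one_eq_nil hge, dloop_none h]
          show max idx (cs.length : Int) = k
          omega
      | some c =>
          have hlt := pg_some_lt h
          have hqk_token_ws : PySem.Chars.isspace c = true → qPred cs idx k = false := by
            intro hs
            unfold qPred bToken
            rw [h]
            simp [hs]
          by_cases hs : PySem.Chars.isspace c
          · -- whitespace: both sides advance one position
            rw [dloop_space h hs]
            rw [PySem.List.pyRange_one_cons (by omega),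
              List.find?_cons_of_neg (by simp [hqk_token_ws hs])]
            have hinc' : incE cs idx (k + 1 - idx).toNat = false := by
              have harith : (k + 1 - idx).toNat = (k - idx).toNat + 1 := by omega
              rw [harith]
              simp only [incE]
              have : idx + ((k - idx).toNat : Int) = k := by omega
              rw [this, hinc, h]
              have : c ≠ ';' := by intro hc; subst hc; simp [PySem.Chars.isspace] at hs
              simp [Bool.false_eq_true, this]
            exact ih (k + 1) (by omega) (by omega) (by omega) hinc'
          · by_cases hc : c = ';'
            · -- comment: the dispatch loop jumps to the first '\n'; stage 2 skips the
              -- covered run because stage 1 marked it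
              subst hc
              rw [dloop_semi h]
              set j := aSkipComment cs (k + 1) with hj
              obtain ⟨hjle, hjrun, hjend⟩ := aSkipComment_spec cs (k + 1)
              have hjub : j ≤ (cs.length : Int) := by
                rcases hjend with hnl | hnone
                · exact le_of_lt (pg_some_lt hnl)
                · by_contra hn
                  -- j reached by +1 steps from k+1 ≤ len; if j > len then j-1 ≥ len was
                  -- inside the run, contradiction with pyGet? some there
                  obtain ⟨c', hc', _⟩ := hjrun (j - 1) (by omega) (by omega)
                  have := pg_some_lt hc'
                  omega
              -- incE is true at k+1 and stays true through the run
              have hinck1 : incE cs idx (k + 1 - idx).toNat = true := by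
                have harith : (k + 1 - idx).toNat = (k - idx).toNat + 1 := by omega
                rw [harith]
                simp only [incE]
                have : idx + ((k - idx).toNat : Int) = k := by omega
                rw [this, hinc, h]
                simp
              have hcov : ∀ i : Int, k + 1 ≤ i → i < j + 1 → incE cs idx (i - idx).toNat = true := by
                intro i hi1 hi2
                have := incE_run cs idx (i - (k + 1)).toNat (k + 1) (by omega) hinck1
                  (fun i' h1 h2 => hjrun i' h1 (by omega))
                have harith : k + 1 + ((i - (k + 1)).toNat : Int) = i := by omega
                rw [harith] at this
                exact this
              have hfail : ∀ i : Int, k ≤ i → i < j → qPred cs idx i = false := by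
                intro i hi1 hi2
                by_cases hik : i = k
                · subst hik
                  unfold qPred bToken
                  rw [h]
                  simp
                · unfold qPred
                  have hmem : i ∈ (bMask cs idx).1 := by
                    rw [bMask_mem]
                    exact ⟨by omega, by omega, hcov i (by omega) (by omega)⟩
                  simp [hmem]
              rcases hjend with hnl | hnone
              · -- the comment ends at a '\n' (itself covered): continue after it
                have hjlt := pg_some_lt hnl
                have hfail' : ∀ i : Int, k ≤ i → i < j + 1 → qPred cs idx i = false := by
                  intro i hi1 hi2
                  by_cases hij : i = j
                  · subst hij
                    unfold qPred
                    have hmem : j ∈ (bMask cs idx).1 := by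
                      rw [bMask_mem]
                      exact ⟨by omega, by omega, hcov j (by omega) (by omega)⟩
                    simp [hmem]
                  · exact hfail i hi1 (by omega)
                rw [find_skip cs idx k (j + 1) (cs.length : Int) (by omega) (by omega) hfail']
                rw [dloop_space hnl (by decide)]
                have hinc' : incE cs idx (j + 1 - idx).toNat = false := by
                  have harith : (j + 1 - idx).toNat = (j - idx).toNat + 1 := by omega
                  rw [harith]
                  simp only [incE]
                  have hjidx : idx + ((j - idx).toNat : Int) = j := by omega
                  rw [hjidx, hcov j (by omega) (by omega), hnl]
                  simp
                exact ih (j + 1) (by omega) (by omega) (by omega) hinc'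
              · -- the comment runs to the end of the string
                have hje : (cs.length : Int) ≤ j := by
                  by_contra hn
                  obtain ⟨c', hc'⟩ := pg_some_of_lt (cs := cs) (i := j) (by omega) (by omega)
                  rw [hnone] at hc'
                  cases hc'
                have hjeq : j = (cs.length : Int) := le_antisymm hjub hje
                rw [find_none_of_fail cs idx ((cs.length : Int) - k).toNat k
                  (cs.length : Int) (by omega) (fun i h1 h2 => hfail i h1 (by omega))]
                rw [hjeq, dloop_none (pg_none_of_ge le_rfl)]
                show max idx (cs.length : Int) = (cs.length : Int)
                omega
            · -- a real token character: both sides stop here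
              rw [dloop_other h (by simpa using hs) hc]
              have hq : qPred cs idx k = true := by
                have hmem : k ∉ (bMask cs idx).1 := by
                  rw [bMask_mem]
                  rintro ⟨-, -, h3⟩
                  rw [hinc] at h3
                  exact absurd h3 (by simp)
                unfold qPred bToken
                rw [h]
                simp [hmem, hs, hc]
              rw [PySem.List.pyRange_one_cons (by omega), List.find?_cons_of_pos hq]
      
-- ===== VERDICT (by name: the statement is the Claim_ definition above) =====
theorem skip_space_spec : Claim_equal_skip_space := by
  intro s idx _ hpre
  have hpre' : -(s.toList.length : Int) ≤ idx := by
    have hl : s.toList.length = s.length := String.length_toList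
    unfold Pre_skip_space at hpre
    rcases hpre with h | h <;> omega
  show skip_space s idx = skip_space_alt s idx
  show aLoop s.toList idx = skip_space_alt s idx
  rw [aLoop_eq_dLoop s.toList (((s.toList.length : Int) - idx).toNat) idx le_rfl]
  rw [← dLoop_eq_find s.toList idx hpre' (((s.toList.length : Int) - idx).toNat) idx le_rfl
    (le_max_left _ _) le_rfl (by simp [incE])]
  rfl
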